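-- pv_equiv track=rewrite | github.com/Sanskarraj/cs-cp | budget.py | can_complete_projects
-- ===== SOURCE A (Python) =====
-- def can_complete_projects(budget, projects):
--     current_budget = budget
--     for project in projects:
--         expenditure, bonus, penalty = project
--         bonus = max(0, int(bonus[1:])) if bonus[1:].isdigit() else 0
--         penalty = int(penalty[1:]) if penalty[1:].isdigit() else 0
--
--         if current_budget >= expenditure:
--             current_budget += bonus + penalty
--         else:
--             return False  # Budget is not sufficient for the current project
--
--     return True  # All projects can be completed within the given budget
-- ===== SOURCE B (Python) =====
-- def can_complete_projects(budget, projects):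
--     # Different decomposition: parse all projects up front into (delta, expenditure)
--     # columns, build the "budget before project i" prefix list, then one all() check.
--     deltas = []
--     expenditures = []
--     for expenditure, bonus, penalty in projects:
--         b = max(0, int(bonus[1:])) if bonus[1:].isdigit() else 0
--         p = int(penalty[1:]) if penalty[1:].isdigit() else 0
--         deltas.append(b + p)
--         expenditures.append(expenditure)
--     prefix = [budget]
--     for d in deltas[:-1]:
--         prefix.append(prefix[-1] + d)
--     return all(pre >= exp for pre, exp in zip(prefix, expenditures))
-- ===== Notes on version B (the rewrite author's own statement) =====
-- stated objective: alternative
-- what changed: Replaces A's early-return mutable loop by a columnar decomposition: parse every project once into (delta, expenditure) lists, build the 'budget before project i' prefix-sum list, and return one all() check over zip(prefix, expenditures).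
import Mathlib
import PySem

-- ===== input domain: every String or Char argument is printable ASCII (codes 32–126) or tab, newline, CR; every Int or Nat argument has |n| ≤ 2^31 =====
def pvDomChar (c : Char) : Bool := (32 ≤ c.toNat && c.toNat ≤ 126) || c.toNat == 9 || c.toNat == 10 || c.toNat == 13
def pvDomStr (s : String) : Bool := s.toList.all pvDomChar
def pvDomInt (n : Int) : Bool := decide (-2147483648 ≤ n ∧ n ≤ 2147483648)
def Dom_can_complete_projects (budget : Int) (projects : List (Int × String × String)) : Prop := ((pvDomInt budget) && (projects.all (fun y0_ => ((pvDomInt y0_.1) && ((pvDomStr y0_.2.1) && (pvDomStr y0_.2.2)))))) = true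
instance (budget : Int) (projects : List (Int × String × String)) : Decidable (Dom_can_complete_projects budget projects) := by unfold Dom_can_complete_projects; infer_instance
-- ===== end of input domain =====

-- B replaces A's early-return mutable loop by a columnar decomposition (parse once,
-- prefix-sum list, one all() pass) — objective: alternative (same O(n) cost).

-- Parsing shared by both sources (the identical Python expressions appear in Source A and Source B):
-- s[1:] → PySem.Str.slice; int(t) under the isdigit guard → (PySem.Int.ofStr? t).getD 0
-- (ofStr? is some whenever strIsdigit holds, so the default is never taken).
def pvTail (s : String) : String := PySem.Str.slice s (some 1) none
def pvBonusVal (s : String) : Int :=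
  if PySem.Str.strIsdigit (pvTail s) then max 0 ((PySem.Int.ofStr? (pvTail s)).getD 0) else 0
def pvPenaltyVal (s : String) : Int :=
  if PySem.Str.strIsdigit (pvTail s) then (PySem.Int.ofStr? (pvTail s)).getD 0 else 0

-- ===== PORT A =====
def can_complete_projects (budget : Int) (projects : List (Int × String × String)) : Bool :=
  match projects with
  | [] => true
  | (expenditure, bonus, penalty) :: rest =>
    let b := pvBonusVal bonus
    let p := pvPenaltyVal penalty
    if expenditure ≤ budget then can_complete_projects (budget + (b + p)) rest
    else false

-- ===== PORT B =====
-- deltas[:-1] is dropLast (PySem.List.slice_to_neg_one); prefix[-1] on the always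
-- non-empty prefix list is getLast!.
def can_complete_projects_alt (budget : Int) (projects : List (Int × String × String)) : Bool :=
  let acc := projects.foldl
    (fun (st : List Int × List Int) pr =>
      (st.1 ++ [pvBonusVal pr.2.1 + pvPenaltyVal pr.2.2], st.2 ++ [pr.1]))
    ([], [])
  let pref := acc.1.dropLast.foldl (fun (pre : List Int) d => pre ++ [pre.getLast! + d]) [budget]
  (pref.zip acc.2).all (fun pe => pe.2 ≤ pe.1)

-- ===== PRECONDITION & SPEC =====
def Spec_can_complete_projects (budget : Int) (projects : List (Int × String × String)) (out : Bool) : Prop := out = can_complete_projects_alt budget projects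
instance (budget : Int) (projects : List (Int × String × String)) (out : Bool) : Decidable (Spec_can_complete_projects budget projects out) := by unfold Spec_can_complete_projects; infer_instance

-- ===== CLAIM (what is proved, stated in full; the proofs are below) =====
def Claim_equal_can_complete_projects : Prop := ∀ (budget : Int) (projects : List (Int × String × String)), Dom_can_complete_projects budget projects → Spec_can_complete_projects budget projects (can_complete_projects budget projects)

-- ===== LEMMAS AND PROOFS =====

def pvDelta (pr : Int × String × String) : Int := pvBonusVal pr.2.1 + pvPenaltyVal pr.2.2

def pvTailScan (b : Int) : List Int → List Int
  | [] => []
  | d :: r => (b + d) :: pvTailScan (b + d) r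

lemma pv_acc_eq (pr : List (Int × String × String)) (ds es : List Int) :
    pr.foldl
      (fun (st : List Int × List Int) p =>
        (st.1 ++ [pvBonusVal p.2.1 + pvPenaltyVal p.2.2], st.2 ++ [p.1]))
      (ds, es) = (ds ++ pr.map pvDelta, es ++ pr.map (·.1)) := by
  induction pr generalizing ds es with
  | nil => simp
  | cons h t ih => simp [List.foldl_cons, ih, pvDelta]

lemma pv_getLast!_concat (l : List Int) (x : Int) : (l ++ [x]).getLast! = x := by
  induction l with
  | nil => rfl
  | cons h t ih =>
    cases t with
    | nil => rfl
    | cons h' t' => simpa using ih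

lemma pv_scan_eq (ds : List Int) (init : List Int) (b : Int)
    (hne : init ≠ []) (hl : init.getLast! = b) :
    ds.foldl (fun (pre : List Int) d => pre ++ [pre.getLast! + d]) init
      = init ++ pvTailScan b ds := by
  induction ds generalizing init b with
  | nil => simp [pvTailScan]
  | cons d t ih =>
    have h1 : (init ++ [init.getLast! + d]).getLast! = b + d := by
      rw [pv_getLast!_concat, hl]
    rw [List.foldl_cons, ih (init ++ [init.getLast! + d]) (b + d) (by simp) h1, hl]
    simp [pvTailScan]

lemma pv_A_cons (b e : Int) (bo pe : String) (rest : List (Int × String × String)) :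
    can_complete_projects b ((e, bo, pe) :: rest)
      = (decide (e ≤ b) && can_complete_projects (b + pvDelta (e, bo, pe)) rest) := by
  rw [can_complete_projects]
  split <;> simp [pvDelta, *]

lemma pv_A_eq_check (b : Int) (rows : List (Int × String × String)) :
    can_complete_projects b rows =
      (((b :: pvTailScan b ((rows.map pvDelta).dropLast)).zip (rows.map (·.1))).all
        (fun pe => pe.2 ≤ pe.1)) := by
  induction rows generalizing b with
  | nil => simp [can_complete_projects]
  | cons hd t ih =>
    obtain ⟨e, bo, pe⟩ := hd
    rw [pv_A_cons]
    cases t with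
    | nil => simp [pvDelta, pvTailScan, can_complete_projects]
    | cons hd' t' =>
      rw [ih]
      have hdr : ((((e, bo, pe) :: hd' :: t').map pvDelta).dropLast)
          = pvDelta (e, bo, pe) :: ((hd' :: t').map pvDelta).dropLast := by
        rw [List.map_cons]
        exact List.dropLast_cons_of_ne_nil (by simp)
      rw [hdr]
      simp [pvTailScan]

-- ===== VERDICT (by name: the statement is the Claim_ definition above) =====
theorem can_complete_projects_spec : Claim_equal_can_complete_projects := by
  intro budget projects _
  unfold Spec_can_complete_projects can_complete_projects_alt
  simp only [pv_acc_eq, List.nil_append]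
  rw [pv_scan_eq _ _ budget (by simp) (by rfl)]
  simp only [List.singleton_append]
  exact pv_A_eq_check budget projects
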